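-- pv_equiv track=rewrite | github.com/Isaacdl2/ClassProjects | Python/CSC_120/fake_news.py | filter_line
-- ===== SOURCE A (Python) =====
-- import string
--
-- def filter_line(line):
--     '''
--     Processes a line of text from the CSV file to filter out unwanted
--     characters and words
--
--     Parameters: line (list) a list representing a line of text from
--     the CSV file
--
--     Returns: A list of filtered words extracted from the line
--     '''
--     punctuation_chars = string.punctuation
--     title = line[4]
--     filtered_words = []
--
--     # Removes punctuation
--     for char in punctuation_chars:
--         title = title.replace(char, " ")
--     title = title.split()
--
--     # Removes words less then 2 chars
--     for word in title:
--         word = word.lower()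
--         if len(word) > 2:
--             filtered_words.append(word)
--
--     return filtered_words
-- ===== SOURCE B (Python) =====
-- import string
--
-- _PUNCT = set(string.punctuation)
--
-- def filter_line(line):
--     title = line[4]
--     filtered_words = []
--     buf = []
--     for ch in title:
--         if ch.isspace() or ch in _PUNCT:
--             if buf:
--                 word = ''.join(buf).lower()
--                 if len(word) > 2:
--                     filtered_words.append(word)
--                 buf = []
--         else:
--             buf.append(ch)
--     if buf:
--         word = ''.join(buf).lower()
--         if len(word) > 2:
--             filtered_words.append(word)
--     return filtered_words
-- ===== Notes on version B (the rewrite author's own statement) =====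
-- stated objective: alternative
-- what changed: Replaces the 32 full-string replace passes plus split plus filter loop with a single character-level tokenizing pass using a precomputed punctuation set and a word buffer; it trades A's C-level string methods for one explicit Python-level scan.
import Mathlib
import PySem

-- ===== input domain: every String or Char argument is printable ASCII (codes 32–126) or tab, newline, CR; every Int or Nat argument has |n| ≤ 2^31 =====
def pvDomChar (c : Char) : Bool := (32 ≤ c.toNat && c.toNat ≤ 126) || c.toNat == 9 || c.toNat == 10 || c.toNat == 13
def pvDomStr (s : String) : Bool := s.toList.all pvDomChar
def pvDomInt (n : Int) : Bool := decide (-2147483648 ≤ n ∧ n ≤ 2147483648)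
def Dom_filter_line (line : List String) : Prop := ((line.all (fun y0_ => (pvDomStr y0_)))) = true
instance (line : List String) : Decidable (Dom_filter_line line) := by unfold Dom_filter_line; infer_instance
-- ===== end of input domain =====

-- B replaces A's 32 full-string replace passes + split + filter loop by one character-level tokenizing pass over a punctuation set (objective: alternative algorithm, same cost).

-- string.punctuation (a shared constant of both Pythons)
def pvPunct : List Char := "!\"#$%&'()*+,-./:;<=>?@[\\]^_`{|}~".toList

-- ===== PORT A =====
def filter_line (line : List String) : List String :=
  match PySem.List.pyGet? line 4 with
  | none => []   -- IndexError in Python; excluded by Pre_filter_line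
  | some title =>
    (PySem.Str.split₀ (pvPunct.foldl (fun t c => PySem.Str.replace t (String.ofList [c]) " ") title)).foldl
      (fun acc w =>
        let w := PySem.Str.lower w
        if 2 < PySem.Str.len w then acc ++ [w] else acc) []

-- ===== PORT B =====
def pvDelim (c : Char) : Bool := PySem.Chars.isspace c || pvPunct.contains c

def pvFlush (buf : List Char) (out : List String) : List String :=
  if buf.isEmpty then out
  else
    let w := PySem.Chars.lower buf
    if 2 < w.length then out ++ [String.ofList w] else out

def pvGo : List Char → List Char → List String → List String
  | [], buf, out => pvFlush buf out
  | c :: rest, buf, out =>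
    if pvDelim c then pvGo rest [] (pvFlush buf out)
    else pvGo rest (buf ++ [c]) out

def filter_line_alt (line : List String) : List String :=
  match PySem.List.pyGet? line 4 with
  | none => []   -- IndexError in Python; excluded by Pre_filter_line
  | some title => pvGo title.toList [] []

-- ===== PRECONDITION & SPEC =====
-- Pre_ excludes exactly the lines with fewer than 5 fields, on which line[4] raises IndexError (B raises there too).
def Pre_filter_line (line : List String) : Prop := 5 ≤ line.length
instance (line : List String) : Decidable (Pre_filter_line line) := by unfold Pre_filter_line; infer_instance

def pvWitness_filter_line : List String := ["a", "b", "c", "d", "Hello, world! ok"]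

def Spec_filter_line (line : List String) (out : List String) : Prop := out = filter_line_alt line
instance (line : List String) (out : List String) : Decidable (Spec_filter_line line out) := by unfold Spec_filter_line; infer_instance

-- ===== CLAIM =====
def Claim_equal_filter_line : Prop := ∀ (line : List String), Dom_filter_line line → Pre_filter_line line → Spec_filter_line line (filter_line line)

-- ===== LEMMAS AND PROOFS =====

-- the substitution effected by A's replace passes
def pvSubst (c : Char) : Char := if pvPunct.contains c then ' ' else c

-- A's per-word lower/filter step, on the Chars side
def pvStepC (acc : List String) (w : List Char) : List String :=
  let w' := PySem.Chars.lower w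
  if 2 < w'.length then acc ++ [String.ofList w'] else acc

lemma replace_go_single (c : Char) :
    ∀ (l : List Char) (fuel : Nat) (acc : List Char), l.length ≤ fuel →
      PySem.Chars.replace.go [c] [' '] fuel l acc
        = acc.reverse ++ l.map (fun x => if x = c then ' ' else x) := by
  intro l
  induction l with
  | nil => intro fuel acc h; cases fuel <;> simp [PySem.Chars.replace.go]
  | cons x t ih =>
    intro fuel acc h
    cases fuel with
    | zero => simp at h
    | succ n =>
      simp only [PySem.Chars.replace.go]
      by_cases hx : x = c
      · subst hx
        simp only [List.isPrefixOf, List.length_cons] at *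
        rw [if_pos (by simp)]
        simp only [List.length_nil, List.drop_succ_cons, List.drop_zero]
        rw [ih n _ (by omega)]
        simp
      · rw [if_neg (by simp [List.isPrefixOf]; exact fun h => absurd h.symm hx)]
        rw [ih n _ (by simpa using Nat.le_of_succ_le_succ h)]
        simp [hx]

lemma replace_single (s : List Char) (c : Char) :
    PySem.Chars.replace s [c] [' '] = s.map (fun x => if x = c then ' ' else x) := by
  rw [PySem.Chars.replace]
  simp only [List.isEmpty_cons, if_neg]
  rw [replace_go_single c s s.length [] (le_refl _)]
  simp

lemma foldl_replace : ∀ (ps : List Char), ' ' ∉ ps → ∀ (s : List Char),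
    ps.foldl (fun t c => PySem.Chars.replace t [c] [' ']) s
      = s.map (fun x => if ps.contains x then ' ' else x) := by
  intro ps
  induction ps with
  | nil => intro _ s; simp
  | cons c t ih =>
    intro h s
    simp only [List.foldl_cons]
    rw [replace_single, ih (by simp at h; exact h.2), List.map_map]
    apply List.map_congr_left
    intro x _
    simp only [Function.comp]
    by_cases hx : x = c
    · subst hx; simp
    · simp [hx]

lemma split₀_go_acc : ∀ (s cur : List Char) (acc : List (List Char)),
    PySem.Chars.split₀.go s cur acc = acc.reverse ++ PySem.Chars.split₀.go s cur [] := by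
  intro s
  induction s with
  | nil =>
    intro cur acc
    simp only [PySem.Chars.split₀.go]
    by_cases h : cur.isEmpty <;> simp [h]
  | cons c rest ih =>
    intro cur acc
    simp only [PySem.Chars.split₀.go]
    by_cases hs : PySem.Chars.isspace c
    · by_cases h : cur.isEmpty
      · simp only [hs, h, if_true]; exact ih [] acc
      · simp only [hs, h, if_true, if_false, Bool.false_eq_true]
        rw [ih [] (cur.reverse :: acc), ih [] [cur.reverse]]
        simp
    · simp only [hs, Bool.false_eq_true, if_false]
      exact ih (c :: cur) acc

lemma delim_iff (c : Char) : pvDelim c = PySem.Chars.isspace (pvSubst c) := by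
  unfold pvDelim pvSubst
  by_cases h : pvPunct.contains c
  · simp only [h, if_true, Bool.or_true]
    have : PySem.Chars.isspace ' ' = true := by decide
    rw [this]
  · have h' : c ∉ pvPunct := by simpa [List.contains_iff_mem] using h
    simp [h', h]

lemma subst_of_not_delim (c : Char) (h : pvDelim c = false) : pvSubst c = c := by
  unfold pvDelim at h
  simp only [Bool.or_eq_false_iff] at h
  have h' : c ∉ pvPunct := by simpa [List.contains_iff_mem] using h.2
  simp [pvSubst, h']

lemma flush_eq_step (buf : List Char) (out : List String) (h : buf ≠ []) :
    pvFlush buf out = pvStepC out buf := by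
  simp [pvFlush, pvStepC, h]

lemma go_eq_foldl : ∀ (s buf : List Char) (out : List String),
    pvGo s buf out
      = (PySem.Chars.split₀.go (s.map pvSubst) buf.reverse []).foldl pvStepC out := by
  intro s
  induction s with
  | nil =>
    intro buf out
    simp only [List.map_nil, pvGo, PySem.Chars.split₀.go]
    by_cases h : buf = []
    · simp [h, pvFlush]
    · have hr : buf.reverse.isEmpty = false := by simp [h]
      rw [if_neg (by simp [hr])]
      simp [flush_eq_step buf out h]
  | cons c rest ih =>
    intro buf out
    simp only [List.map_cons, pvGo, PySem.Chars.split₀.go]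
    by_cases hd : pvDelim c
    · have hs : PySem.Chars.isspace (pvSubst c) = true := by rw [← delim_iff]; exact hd
      rw [if_pos hd, if_pos hs]
      by_cases h : buf = []
      · subst h
        simp only [List.reverse_nil, List.isEmpty_nil, if_true]
        rw [show pvFlush [] out = out from rfl, ih [] out]
        simp
      · have hr : buf.reverse.isEmpty = false := by simp [h]
        rw [if_neg (by simp [hr])]
        rw [split₀_go_acc _ [] [buf.reverse.reverse]]
        simp only [List.reverse_cons, List.reverse_nil, List.nil_append, List.reverse_reverse,
          List.foldl_append, List.foldl_cons, List.foldl_nil]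
        rw [flush_eq_step buf out h, ih [] (pvStepC out buf)]
        simp
    · have hs : PySem.Chars.isspace (pvSubst c) = false := by rw [← delim_iff]; exact Bool.eq_false_iff.mpr hd
      rw [if_neg (by simp [hd]), if_neg (by simp [hs]), subst_of_not_delim c (Bool.eq_false_iff.mpr hd)]
      rw [ih (buf ++ [c]) out]
      simp

lemma foldl_str_chars : ∀ (ws : List String) (out : List String),
    ws.foldl (fun acc w =>
        let w := PySem.Str.lower w
        if 2 < PySem.Str.len w then acc ++ [w] else acc) out
      = (ws.map String.toList).foldl pvStepC out := by
  intro ws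
  induction ws with
  | nil => intro out; simp
  | cons w t ih =>
    intro out
    simp only [List.foldl_cons, List.map_cons]
    rw [ih]
    congr 1
    simp only [pvStepC, PySem.Str.len, PySem.Str.lower]
    simp [PySem.Str.toList_lower]

lemma foldl_replace_str : ∀ (ps : List Char) (title : String),
    (ps.foldl (fun t c => PySem.Str.replace t (String.ofList [c]) " ") title).toList
      = ps.foldl (fun cs c => PySem.Chars.replace cs [c] [' ']) title.toList := by
  intro ps
  induction ps with
  | nil => intro title; simp
  | cons c t ih =>
    intro title
    simp only [List.foldl_cons]
    rw [ih]
    congr 2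
    rw [PySem.Str.toList_replace]
    congr 1
    simp

theorem ports_agree_on_title : ∀ (title : String),
    (PySem.Str.split₀ (pvPunct.foldl (fun t c => PySem.Str.replace t (String.ofList [c]) " ") title)).foldl
      (fun acc w => let w := PySem.Str.lower w; if 2 < PySem.Str.len w then acc ++ [w] else acc) []
    = pvGo title.toList [] [] := by
  intro title
  rw [foldl_str_chars, PySem.Str.split₀_map_toList, foldl_replace_str,
    foldl_replace pvPunct (by decide) title.toList, go_eq_foldl]
  rfl

-- ===== VERDICT =====
theorem filter_line_spec : Claim_equal_filter_line := by
  intro line _ _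
  unfold Spec_filter_line filter_line filter_line_alt
  cases PySem.List.pyGet? line 4 with
  | none => rfl
  | some title => exact ports_agree_on_title title
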